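-- pv_equiv track=rewrite | github.com/kkr010128/codebert | problem024/problem024_129.py | req_count
-- ===== SOURCE A (Python) =====
-- def req_count(P, K, W):
--     cnt = 0
--     for k in range(K):
--         p = 0
--         while p + W[cnt] <= P:
--             p += W[cnt]
--             cnt += 1
--             if cnt == len(W):
--                 return cnt
--     else:
--         return cnt
-- ===== SOURCE B (Python) =====
-- def req_count(P, K, W):
--     # One pass: greedy segment sizes (items per truck), then sum the first K.
--     segs = []
--     p = 0
--     c = 0
--     for w in W:
--         if p + w <= P:
--             p += w
--             c += 1
--         elif w <= P:
--             segs.append(c)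
--             p = w
--             c = 1
--         else:
--             break  # this item fits in no truck; nothing after it can load
--     segs.append(c)
--     return sum(segs[:K]) if K > 0 else 0
-- ===== Notes on version B (the rewrite author's own statement) =====
-- stated objective: alternative
-- what changed: A simulates truck by truck (outer loop over K trucks, inner while filling each); B makes one item-driven pass that records the greedy per-truck segment sizes and returns the sum of the first K, exiting early at an item that fits in no truck (where A still spins through every remaining truck).
import Mathlib
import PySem

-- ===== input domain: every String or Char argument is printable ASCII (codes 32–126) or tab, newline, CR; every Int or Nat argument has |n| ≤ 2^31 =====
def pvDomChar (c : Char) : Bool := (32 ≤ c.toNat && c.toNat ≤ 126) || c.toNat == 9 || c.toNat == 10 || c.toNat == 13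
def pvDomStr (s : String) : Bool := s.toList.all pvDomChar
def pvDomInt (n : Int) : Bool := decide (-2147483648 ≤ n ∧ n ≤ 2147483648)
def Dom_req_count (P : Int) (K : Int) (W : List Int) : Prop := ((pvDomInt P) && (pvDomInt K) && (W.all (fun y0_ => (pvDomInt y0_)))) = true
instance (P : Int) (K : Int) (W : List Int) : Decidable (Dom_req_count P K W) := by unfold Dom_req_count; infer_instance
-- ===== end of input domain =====

-- B replaces A's truck-driven loop (outer for over K trucks, inner while) by one item-driven
-- pass that records the greedy per-truck load sizes and sums the first K; equal return values.

-- ===== PORT A =====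
-- inner while loop of A: current truck load p, index cnt; returns (new cnt, done-flag),
-- done = true when A's mid-loop `return cnt` fired (all items loaded) or W[cnt] is out of
-- range (Python raises there; excluded by Pre_).
def innerA (P : Int) (W : List Int) (p : Int) (cnt : Nat) : Nat × Bool :=
  match h : W[cnt]? with
  | none => (cnt, true)
  | some w =>
    if p + w ≤ P then
      if cnt + 1 = W.length then (cnt + 1, true) else innerA P W (p + w) (cnt + 1)
    else (cnt, false)
termination_by W.length - cnt
decreasing_by
  obtain ⟨hlt, -⟩ := List.getElem?_eq_some_iff.mp h
  omega

-- outer `for k in range(K)` loop of A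
def outerA (P : Int) (W : List Int) : Nat → Nat → Nat
  | 0, cnt => cnt
  | k + 1, cnt =>
    let r := innerA P W 0 cnt
    if r.2 then r.1 else outerA P W k r.1

def req_count (P : Int) (K : Int) (W : List Int) : Int :=
  (outerA P W K.toNat 0 : Int)

-- ===== PORT B =====
-- B's single for-loop: builds the list of greedy segment sizes (items per truck);
-- segs is the accumulated list, p the current load, c the current segment's count.
def bScan (P : Int) : List Int → Int → Int → List Int → List Int
  | [], _p, c, segs => segs ++ [c]
  | w :: ws, p, c, segs =>
    if p + w ≤ P then bScan P ws (p + w) (c + 1) segs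
    else if w ≤ P then bScan P ws w 1 (segs ++ [c])
    else segs ++ [c]      -- break: item fits in no truck

def req_count_alt (P : Int) (K : Int) (W : List Int) : Int :=
  if 0 < K then ((bScan P W 0 0 []).take K.toNat).sum else 0

-- ===== PRECONDITION & SPEC =====
-- Pre_ excludes only W = [] with K ≥ 1, where A raises IndexError on W[0].
def Pre_req_count (P : Int) (K : Int) (W : List Int) : Prop := W ≠ [] ∨ K ≤ 0
instance (P : Int) (K : Int) (W : List Int) : Decidable (Pre_req_count P K W) := by
  unfold Pre_req_count; infer_instance

def pvWitness_req_count : Int × Int × List Int := (10, 2, [3, 4, 5])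

def Spec_req_count (P : Int) (K : Int) (W : List Int) (out : Int) : Prop := out = req_count_alt P K W
instance (P : Int) (K : Int) (W : List Int) (out : Int) : Decidable (Spec_req_count P K W out) := by unfold Spec_req_count; infer_instance

-- ===== CLAIM (what is proved, stated in full; the proofs are below) =====
def Claim_equal_req_count : Prop := ∀ (P : Int) (K : Int) (W : List Int), Dom_req_count P K W → Pre_req_count P K W → Spec_req_count P K W (req_count P K W)


-- ===== LEMMAS AND PROOFS =====

-- proof-side list forms of A's loops
def consume (P : Int) : Int → List Int → Nat
  | _, [] => 0
  | p, w :: ws => if p + w ≤ P then consume P (p + w) ws + 1 else 0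

def full (P : Int) : Int → List Int → Bool
  | _, [] => true
  | p, w :: ws => if p + w ≤ P then full P (p + w) ws else false

def runO (P : Int) : Nat → List Int → Nat
  | 0, _ => 0
  | k + 1, ws =>
    let n := consume P 0 ws
    if full P 0 ws then n else n + runO P k (ws.drop n)

def runA (P : Int) : Nat → Int → List Int → Nat
  | _, _, [] => 0
  | k, p, w :: ws =>
    if p + w ≤ P then runA P k (p + w) ws + 1
    else if k ≤ 1 then 0 else runA P (k - 1) 0 (w :: ws)
termination_by k _ ws => (ws.length, k)
decreasing_by
  · simp; omega
  · simp_wf; omega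

theorem innerA_eq (P : Int) : ∀ ws (W : List Int) (cnt : Nat) (p : Int),
    W.drop cnt = ws → cnt ≤ W.length →
    innerA P W p cnt = (cnt + consume P p ws, full P p ws) := by
  intro ws
  induction ws with
  | nil =>
    intro W cnt p hd hle
    have hlen : W.length - cnt = 0 := by
      have := congrArg List.length hd; simpa using this
    have hnone : W[cnt]? = none := by
      rw [List.getElem?_eq_none_iff]; omega
    unfold innerA
    split
    · simp [consume, full]
    · next w heq => rw [hnone] at heq; cases heq
  | cons w ws ih =>
    intro W cnt p hd hle
    have hget : W[cnt]? = some w := by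
      have h0 : (W.drop cnt)[0]? = some w := by rw [hd]; rfl
      rw [List.getElem?_drop] at h0
      simpa using h0
    have hlt : cnt < W.length := by
      rcases List.getElem?_eq_some_iff.mp hget with ⟨h, -⟩; exact h
    have hd' : W.drop (cnt + 1) = ws := by
      have ht : (W.drop cnt).tail = ws := by rw [hd]; rfl
      simpa [List.tail_drop] using ht
    unfold innerA
    split
    · next heq => rw [hget] at heq; cases heq
    · next w' heq =>
      rw [hget] at heq
      injection heq with hw; subst hw
      simp only [consume, full]
      by_cases hc : p + w ≤ P
      · rw [if_pos hc]
        by_cases he : cnt + 1 = W.length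
        · have hnil : ws = [] := by
            have := hd'; rw [he] at this; simpa using this
          subst hnil
          simp [he, hc, consume, full]
        · rw [if_neg he, ih W (cnt + 1) (p + w) hd' (by omega)]
          simp [hc, Prod.ext_iff]; omega
      · simp [hc]

theorem consume_le (P : Int) : ∀ ws (p : Int), consume P p ws ≤ ws.length := by
  intro ws
  induction ws with
  | nil => intro p; simp [consume]
  | cons w ws ih =>
    intro p
    simp only [consume, List.length_cons]
    split
    · have := ih (p + w); omega
    · omega

theorem outerA_eq (P : Int) : ∀ (k : Nat) (W : List Int) (cnt : Nat),
    cnt ≤ W.length → outerA P W k cnt = cnt + runO P k (W.drop cnt) := by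
  intro k
  induction k with
  | zero => intro W cnt h; simp [outerA, runO]
  | succ k ih =>
    intro W cnt h
    have hinner := innerA_eq P (W.drop cnt) W cnt 0 rfl h
    have hcle : consume P 0 (W.drop cnt) ≤ W.length - cnt := by
      have := consume_le P (W.drop cnt) 0
      simpa [List.length_drop] using this
    simp only [outerA, hinner, runO]
    by_cases hf : full P 0 (W.drop cnt)
    · simp [hf]
    · simp only [hf, if_false, Bool.false_eq_true]
      rw [ih W (cnt + consume P 0 (W.drop cnt)) (by omega)]
      rw [List.drop_drop]
      omega

-- segment split of runA: first truck, then the remaining trucks on the rest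
theorem runA_split (P : Int) : ∀ ws (p : Int) (k : Nat),
    runA P k p ws = consume P p ws +
      (if full P p ws then 0 else if k ≤ 1 then 0 else runA P (k - 1) 0 (ws.drop (consume P p ws))) := by
  intro ws
  induction ws with
  | nil => intro p k; simp [runA, consume, full]
  | cons w ws ih =>
    intro p k
    rw [runA]
    simp only [consume, full]
    by_cases hc : p + w ≤ P
    · rw [if_pos hc, if_pos hc, if_pos hc, ih (p + w) k]
      simp only [List.drop_succ_cons]
      split
      · omega
      · split <;> omega
    · rw [if_neg hc, if_neg hc, if_neg hc]
      simp

theorem runO_eq_runA (P : Int) : ∀ (k : Nat) (ws : List Int),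
    runO P (k + 1) ws = runA P (k + 1) 0 ws := by
  intro k
  induction k with
  | zero =>
    intro ws
    rw [runA_split, runO]
    split <;> simp [runO]
  | succ k ih =>
    intro ws
    rw [runA_split, runO]
    split
    · simp
    · rw [if_neg (by omega : ¬ k + 1 + 1 ≤ 1)]
      rw [ih]
      simp

theorem bScan_acc (P : Int) : ∀ ws (p c : Int) (segs : List Int),
    bScan P ws p c segs = segs ++ bScan P ws p c [] := by
  intro ws
  induction ws with
  | nil => intro p c segs; simp [bScan]
  | cons w ws ih =>
    intro p c segs
    simp only [bScan, List.nil_append]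
    split
    · exact ih _ _ _
    · split
      · rw [ih _ _ (segs ++ [c]), ih _ _ [c]]; simp
      · simp

-- the head of bScan … c [] is c plus its value for c = 0; the tail does not depend on c
theorem bScan_head (P : Int) : ∀ ws (p : Int), ∃ x t, ∀ c : Int, bScan P ws p c [] = (x + c) :: t := by
  intro ws
  induction ws with
  | nil => intro p; exact ⟨0, [], by intro c; simp [bScan]⟩
  | cons w ws ih =>
    intro p
    by_cases hc : p + w ≤ P
    · obtain ⟨x, t, hx⟩ := ih (p + w)
      refine ⟨x + 1, t, ?_⟩
      intro c
      simp only [bScan, hc, if_true]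
      rw [hx (c + 1)]
      ring_nf
    · by_cases hw : w ≤ P
      · refine ⟨0, bScan P ws w 1 [], ?_⟩
        intro c
        simp only [bScan, hc, hw, if_false, if_true]
        rw [bScan_acc]
        simp
      · exact ⟨0, [], by intro c; simp [bScan, hc, hw]⟩

theorem runA_oversize (P w : Int) (ws : List Int) (hw : P < w) :
    ∀ (k : Nat) (p : Int), P < p + w → runA P k p (w :: ws) = 0 := by
  intro k
  induction k with
  | zero => intro p hp; rw [runA]; rw [if_neg (by omega)]; simp
  | succ k ih =>
    intro p hp
    rw [runA, if_neg (by omega)]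
    by_cases hk : k + 1 ≤ 1
    · rw [if_pos hk]
    · rw [if_neg hk]
      simpa using ih 0 (by omega)

theorem runA_eq_bScan (P : Int) : ∀ ws (p : Int) (k : Nat), 1 ≤ k →
    ((runA P k p ws : Nat) : Int) = ((bScan P ws p 0 []).take k).sum := by
  intro ws
  induction ws with
  | nil => intro p k hk; cases k with | zero => omega | succ k => simp [runA, bScan]
  | cons w ws ih =>
    intro p k hk
    by_cases hc : p + w ≤ P
    · rw [runA, if_pos hc]
      simp only [bScan, hc, if_true]
      obtain ⟨x, t, hx⟩ := bScan_head P ws (p + w)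
      rw [show (0:Int)+1 = 1 by ring, hx 1]
      cases k with
      | zero => omega
      | succ k =>
        have ihk := ih (p + w) (k + 1) (by omega)
        rw [hx 0] at ihk
        simp only [List.take_succ_cons, List.sum_cons] at ihk ⊢
        push_cast at ihk ⊢
        omega
    · by_cases hw : w ≤ P
      · rw [runA, if_neg hc]
        simp only [bScan, hc, hw, if_false, if_true, List.nil_append]
        rw [bScan_acc]
        simp only [List.singleton_append]
        cases k with
        | zero => omega
        | succ k =>
          simp only [List.take_succ_cons, List.sum_cons]
          cases k with
          | zero => simp
          | succ k =>
            rw [if_neg (by omega : ¬ k + 1 + 1 ≤ 1)]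
            simp only [Nat.add_sub_cancel]
            have hstep : runA P (k + 1) 0 (w :: ws) = runA P (k + 1) (0 + w) ws + 1 := by
              rw [runA, if_pos (by omega)]
            rw [hstep]
            obtain ⟨x, t, hx⟩ := bScan_head P ws w
            rw [hx 1]
            have ihk := ih w (k + 1) (by omega)
            rw [hx 0] at ihk
            simp only [List.take_succ_cons, List.sum_cons] at ihk ⊢
            rw [show (0 : Int) + w = w by ring]
            push_cast at ihk ⊢
            omega
      · have hz := runA_oversize P w ws (by omega) k p (by omega)
        rw [hz]
        simp only [bScan, if_neg hc, if_neg hw, List.nil_append]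
        cases k with
        | zero => omega
        | succ k => simp

-- ===== VERDICT (by name: the statement is the Claim_ definition above) =====
theorem req_count_spec : Claim_equal_req_count := by
  intro P K W _ hpre
  unfold Spec_req_count req_count req_count_alt
  by_cases hK : 0 < K
  · obtain ⟨k, hk⟩ : ∃ k, K.toNat = k + 1 := ⟨K.toNat - 1, by omega⟩
    rw [if_pos hK, hk]
    rw [outerA_eq P (k + 1) W 0 (by omega)]
    simp only [List.drop_zero, Nat.zero_add]
    rw [runO_eq_runA]
    rw [← hk]
    exact runA_eq_bScan P W 0 K.toNat (by omega)
  · have h0 : K.toNat = 0 := by omega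
    rw [if_neg hK, h0]
    simp [outerA]
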